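-- pv_equiv track=rewrite | github.com/gtrivedi88/content-editorial-assistant | app/services/parsing/base.py | _extract_xml_text_positions
-- ===== SOURCE A (Python) =====
-- def _extract_xml_text_positions(
--     raw_xml: str,
-- ) -> tuple[list[str], list[int]]:
--     """Extract non-tag characters and their positions from serialised XML.
--
--     Args:
--         raw_xml: Serialised XML or HTML string.
--
--     Returns:
--         Tuple of (characters, positions) for text outside tags.
--     """
--     text_chars: list[str] = []
--     text_positions: list[int] = []
--     in_tag = False
--     for i, ch in enumerate(raw_xml):
--         if ch == "<":
--             in_tag = True
--         elif ch == ">" and in_tag: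
--             in_tag = False
--         elif not in_tag:
--             text_chars.append(ch)
--             text_positions.append(i)
--     return text_chars, text_positions
-- ===== SOURCE B (Python) =====
-- def _extract_xml_text_positions(
--     raw_xml: str,
-- ) -> tuple[list[str], list[int]]:
--     """Span-jumping rewrite: find tag boundaries with str.find and copy only
--     the text gaps, instead of a per-character in_tag state machine."""
--     text_chars: list[str] = []
--     text_positions: list[int] = []
--     pos = 0
--     n = len(raw_xml)
--     while pos < n:
--         lt = raw_xml.find("<", pos)
--         if lt == -1:
--             lt = n
--         text_chars.extend(raw_xml[pos:lt])
--         text_positions.extend(range(pos, lt))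
--         if lt == n:
--             break
--         gt = raw_xml.find(">", lt)
--         pos = n if gt == -1 else gt + 1
--     return text_chars, text_positions
-- ===== Notes on version B (the rewrite author's own statement) =====
-- stated objective: faster
-- what changed: Replaces the per-character in_tag boolean state machine with a span-jumping loop that uses str.find to locate each '<' and its closing '>' and copies only the text gaps between tags.
import Mathlib
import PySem

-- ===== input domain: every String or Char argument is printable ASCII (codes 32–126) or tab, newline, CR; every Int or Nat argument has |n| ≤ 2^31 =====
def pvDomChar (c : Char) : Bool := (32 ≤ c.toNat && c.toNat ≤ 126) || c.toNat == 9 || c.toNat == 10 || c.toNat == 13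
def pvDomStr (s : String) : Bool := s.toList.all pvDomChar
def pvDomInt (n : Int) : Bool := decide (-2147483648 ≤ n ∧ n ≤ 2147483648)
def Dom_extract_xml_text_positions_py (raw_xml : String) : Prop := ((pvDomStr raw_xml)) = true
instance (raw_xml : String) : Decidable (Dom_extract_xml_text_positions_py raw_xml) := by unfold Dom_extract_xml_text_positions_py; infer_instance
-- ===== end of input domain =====

-- B replaces A's per-character in_tag state machine by span jumps with str.find,
-- copying only the text gaps between tags; return value proved equal on all inputs.


-- ===== PORT A =====
-- A's `for i, ch in enumerate(raw_xml)` with the in_tag flag, as the obvious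
-- structural recursion over the characters carrying (index, in_tag, accumulators).
def pvAGo : List Char → Int → Bool → List String → List Int → List String × List Int
  | [], _, _, chars, poss => (chars, poss)
  | ch :: rest, i, in_tag, chars, poss =>
    if ch = '<' then pvAGo rest (i + 1) true chars poss
    else if ch = '>' ∧ in_tag = true then pvAGo rest (i + 1) false chars poss
    else if in_tag = false then pvAGo rest (i + 1) in_tag (chars ++ [String.ofList [ch]]) (poss ++ [i])
    else pvAGo rest (i + 1) in_tag chars poss

def extract_xml_text_positions_py (raw_xml : String) : List String × List Int :=
  pvAGo raw_xml.toList 0 false [] []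

-- ===== PORT B =====
-- B's `while pos < n` loop; the fuel (length+1) only makes the recursion structurally
-- total: pos strictly increases each iteration, so fuel never runs out while pos < n.
-- text_chars.extend(raw_xml[pos:lt]) is the slice's characters as 1-char strings.
def pvBGo : Nat → Nat → List Char → List String → List Int → List String × List Int
  | 0, _, _, chars, poss => (chars, poss)
  | fuel + 1, pos, cs, chars, poss =>
    let n := cs.length
    if pos < n then
      let ltI := PySem.Chars.findFrom cs ['<'] (pos : Int) none
      let lt : Nat := if ltI = -1 then n else ltI.toNat
      let acc := (chars ++ (PySem.List.slice cs (some (pos : Int)) (some (lt : Int))).map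
          (fun c => String.ofList [c]),
        poss ++ PySem.List.pyRange (pos : Int) (lt : Int) 1)
      if lt = n then acc
      else
        let gtI := PySem.Chars.findFrom cs ['>'] (lt : Int) none
        let pos' := if gtI = -1 then n else gtI.toNat + 1
        pvBGo fuel pos' cs acc.1 acc.2
    else (chars, poss)

def extract_xml_text_positions_py_alt (raw_xml : String) : List String × List Int :=
  pvBGo (raw_xml.toList.length + 1) 0 raw_xml.toList [] []

-- ===== PRECONDITION & SPEC =====
def Spec_extract_xml_text_positions_py (raw_xml : String) (out : List String × List Int) : Prop := out = extract_xml_text_positions_py_alt raw_xml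
instance (raw_xml : String) (out : List String × List Int) : Decidable (Spec_extract_xml_text_positions_py raw_xml out) := by unfold Spec_extract_xml_text_positions_py; infer_instance

-- ===== CLAIM (what is proved, stated in full; the proofs are below) =====
def Claim_equal_extract_xml_text_positions_py : Prop := ∀ (raw_xml : String), Dom_extract_xml_text_positions_py raw_xml → Spec_extract_xml_text_positions_py raw_xml (extract_xml_text_positions_py raw_xml)

-- ===== LEMMAS AND PROOFS =====

-- every element of takeWhile (· != c) differs from c
theorem pv_takeWhile_ne (d : List Char) (c : Char) :
    ∀ x ∈ d.takeWhile (· != c), x ≠ c := by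
  intro x hx
  have := List.mem_takeWhile_imp hx
  simpa using this

-- splitting a list at the first occurrence of c
theorem pv_split (d : List Char) (c : Char) (hc : c ∈ d) :
    d = d.takeWhile (· != c) ++ c :: (d.dropWhile (· != c)).tail := by
  have hne : d.dropWhile (· != c) ≠ [] := by
    intro h
    have heq : d.takeWhile (· != c) = d := by
      conv_rhs => rw [← List.takeWhile_append_dropWhile (p := (· != c)) (l := d)]
      rw [h, List.append_nil]
    have hmem : c ∈ d.takeWhile (· != c) := by rw [heq]; exact hc
    exact pv_takeWhile_ne d c c hmem rfl
  have hx := List.head_dropWhile_not (· != c) hne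
  have hxc : (d.dropWhile (· != c)).head hne = c := by simpa using hx
  conv_lhs => rw [← List.takeWhile_append_dropWhile (p := (· != c)) (l := d)]
  congr 1
  have hct := List.cons_head_tail hne
  rw [hxc] at hct
  exact hct.symm

-- singleton prefix of a drop = the character at that index
theorem pv_singleton_prefix_drop (d : List Char) (c : Char) (j : Nat) :
    [c] <+: d.drop j ↔ d[j]? = some c := by
  rw [← List.head?_drop]
  cases h : d.drop j with
  | nil => simp [List.prefix_iff_eq_take]
  | cons x xs =>
    simp only [List.head?_cons]
    constructor
    · rintro ⟨t, ht⟩; simp at ht; simp [ht.1]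
    · rintro hx; simp at hx; exact ⟨xs, by simp [hx]⟩

-- Python's s.find(c) for a single character c, characterised by takeWhile
theorem pv_find_single (d : List Char) (c : Char) :
    PySem.Chars.find d [c] =
      if c ∈ d then ((d.takeWhile (· != c)).length : Int) else -1 := by
  by_cases hc : c ∈ d
  · rw [if_pos hc]
    set t := (d.takeWhile (· != c)).length with ht
    have hpre : d.takeWhile (· != c) <+: d := List.takeWhile_prefix _
    have hsplit := pv_split d c hc
    have htlt : t < d.length := by
      conv_rhs => rw [hsplit]
      simp [ht]
    have hat : d[t]? = some c := by
      conv_lhs => rw [hsplit]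
      rw [List.getElem?_append_right (by omega)]
      simp [ht]
    have hmin : ∀ i, i < t → d[i]? ≠ some c := by
      intro i hi hEq
      have hiw : i < (d.takeWhile (· != c)).length := hi
      have hmem : (d.takeWhile (· != c))[i] ∈ d.takeWhile (· != c) := List.getElem_mem _
      have hpred := pv_takeWhile_ne d c _ hmem
      have hilt : i < d.length := by omega
      have hgi : (d.takeWhile (· != c))[i] = d[i] := List.IsPrefix.getElem hpre hiw
      have hdi : d[i] = c := by
        rw [List.getElem?_eq_getElem hilt] at hEq
        exact Option.some.inj hEq
      rw [hgi, hdi] at hpred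
      exact hpred rfl
    have hin : [c] <:+: d :=
      ((pv_singleton_prefix_drop d c t).mpr hat).isInfix.trans (List.drop_suffix t d).isInfix
    have hnn : 0 ≤ PySem.Chars.find d [c] := (PySem.Chars.find_nonneg_iff d [c]).mpr hin
    obtain ⟨hp, hm⟩ := PySem.Chars.find_spec hnn
    have hfat : d[(PySem.Chars.find d [c]).toNat]? = some c :=
      (pv_singleton_prefix_drop d c _).mp hp
    have hfe : (PySem.Chars.find d [c]).toNat = t := by
      rcases lt_trichotomy (PySem.Chars.find d [c]).toNat t with h | h | h
      · exact absurd hfat (hmin _ h)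
      · exact h
      · exact absurd ((pv_singleton_prefix_drop d c t).mpr hat) (hm t h)
    omega
  · rw [if_neg hc, PySem.Chars.find_eq_neg_one_iff]
    intro hinf
    exact hc (List.singleton_sublist.mp hinf.sublist)

-- A over a segment with no '<', starting outside a tag: records every character
theorem pv_aGo_text (seg : List Char) :
    ∀ (rest : List Char) (i : Int) (chars : List String) (poss : List Int),
      (∀ x ∈ seg, x ≠ '<') →
      pvAGo (seg ++ rest) i false chars poss =
        pvAGo rest (i + seg.length) false
          (chars ++ seg.map (fun c => String.ofList [c]))
          (poss ++ PySem.List.pyRange i (i + seg.length) 1) := by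
  induction seg with
  | nil => intro rest i chars poss _; simp [PySem.List.pyRange_one_eq_nil (le_refl i)]
  | cons c seg ih =>
    intro rest i chars poss hno
    have hc : c ≠ '<' := hno c (by simp)
    have hrng : PySem.List.pyRange i (i + ((seg.length + 1 : Nat) : Int)) 1 =
        i :: PySem.List.pyRange (i + 1) (i + ((seg.length + 1 : Nat) : Int)) 1 :=
      PySem.List.pyRange_one_cons (by push_cast; omega)
    simp only [List.cons_append, pvAGo, if_neg hc]
    simp only [if_true, Bool.false_eq_true, and_false, if_false]
    rw [ih rest (i + 1) (chars ++ [String.ofList [c]]) (poss ++ [i])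
      (fun x hx => hno x (by simp [hx]))]
    have hidx : i + 1 + (seg.length : Int) = i + ((seg.length + 1 : Nat) : Int) := by
      push_cast; ring
    rw [hidx]
    congr 1
    · simp
    · rw [List.length_cons]
      rw [show i + (((seg.length + 1 : Nat)) : Int) = i + ((seg.length + 1 : Nat) : Int) from rfl,
        hrng]
      simp

-- A over a segment with no '>', inside a tag: records nothing
theorem pv_aGo_tag (seg : List Char) :
    ∀ (rest : List Char) (i : Int) (chars : List String) (poss : List Int),
      (∀ x ∈ seg, x ≠ '>') →
      pvAGo (seg ++ rest) i true chars poss = pvAGo rest (i + seg.length) true chars poss := by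
  induction seg with
  | nil => intro rest i chars poss _; simp
  | cons c seg ih =>
    intro rest i chars poss hno
    have hc : c ≠ '>' := hno c (by simp)
    have hidx : i + 1 + (seg.length : Int) = i + ((c :: seg).length : Int) := by
      simp; ring
    simp only [List.cons_append, pvAGo]
    by_cases h1 : c = '<'
    · rw [if_pos h1, ih rest (i + 1) chars poss (fun x hx => hno x (by simp [hx])), hidx]
    · rw [if_neg h1, if_neg (by simp [hc]), if_neg (by simp),
        ih rest (i + 1) chars poss (fun x hx => hno x (by simp [hx])), hidx]

-- main correspondence: B from position pos ≡ A on the suffix from pos, outside a tag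
theorem pv_main (fuel : Nat) :
    ∀ (pos : Nat) (cs : List Char) (chars : List String) (poss : List Int),
      cs.length - pos < fuel →
      pvBGo fuel pos cs chars poss = pvAGo (cs.drop pos) (pos : Int) false chars poss := by
  induction fuel with
  | zero => intro pos cs _ _ h; omega
  | succ fuel ih =>
    intro pos cs chars poss hfuel
    by_cases hpn : pos < cs.length
    case neg =>
      have hnil : cs.drop pos = [] := List.drop_eq_nil_of_le (by omega)
      simp [pvBGo, hpn, hnil, pvAGo]
    case pos =>
      have hdlen : (cs.drop pos).length = cs.length - pos := by simp
      have hfrom : PySem.Chars.findFrom cs ['<'] (pos : Int) none =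
          if PySem.Chars.find (cs.drop pos) ['<'] = -1 then -1
          else (pos : Int) + PySem.Chars.find (cs.drop pos) ['<'] :=
        PySem.Chars.findFrom_natCast cs ['<'] pos (le_of_lt hpn)
      by_cases hmem : '<' ∈ cs.drop pos
      case neg =>
        -- no '<' ahead: B copies range(pos, n) and stops; A records every remaining char
        have hfind : PySem.Chars.find (cs.drop pos) ['<'] = -1 := by
          rw [pv_find_single, if_neg hmem]
        have hltI : PySem.Chars.findFrom cs ['<'] (pos : Int) none = -1 := by
          rw [hfrom, if_pos hfind]
        simp only [pvBGo, if_pos hpn, hltI, reduceIte]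
        rw [PySem.List.slice_natCast, ← hdlen, List.take_length]
        conv_rhs => rw [show cs.drop pos = cs.drop pos ++ [] by simp]
        rw [pv_aGo_text (cs.drop pos) [] (pos : Int) chars poss (fun x hx => by
          intro h; exact hmem (h ▸ hx))]
        rw [hdlen]
        have hcast2 : (pos : Int) + ((cs.length - pos : Nat) : Int) = (cs.length : Int) := by omega
        rw [hcast2]
        simp [pvAGo]
      case pos =>
        -- '<' ahead: B copies the gap to lt = pos + t0, then jumps past the '>'
        have hsplit := pv_split (cs.drop pos) '<' hmem
        set seg := (cs.drop pos).takeWhile (· != '<') with hseg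
        set tl := ((cs.drop pos).dropWhile (· != '<')).tail with htl
        set t0 := seg.length with ht0
        have hfind : PySem.Chars.find (cs.drop pos) ['<'] = (t0 : Int) := by
          rw [pv_find_single, if_pos hmem]
        have hdlen2 : (cs.drop pos).length = t0 + 1 + tl.length := by
          rw [hsplit]; simp [ht0]; omega
        have ht0lt : pos + t0 < cs.length := by omega
        have hltI : PySem.Chars.findFrom cs ['<'] (pos : Int) none = ((pos + t0 : Nat) : Int) := by
          rw [hfrom, hfind, if_neg (by omega : ¬ (t0 : Int) = -1)]
          omega
        have htake : (cs.drop pos).take t0 = seg :=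
          (List.prefix_iff_eq_take.mp (List.takeWhile_prefix _)).symm
        have hdropd : cs.drop (pos + t0) = '<' :: tl := by
          rw [← List.drop_drop, hsplit, ht0, List.drop_left]
        -- A side down to the tag body
        have hAside : pvAGo (cs.drop pos) (pos : Int) false chars poss
            = pvAGo tl (((pos + t0 + 1 : Nat) : Int)) true
                (chars ++ seg.map (fun c => String.ofList [c]))
                (poss ++ PySem.List.pyRange (pos : Int) ((pos + t0 : Nat) : Int) 1) := by
          conv_lhs => rw [hsplit]
          rw [pv_aGo_text seg ('<' :: tl) (pos : Int) chars poss (pv_takeWhile_ne _ '<')]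
          rw [show (pos : Int) + (seg.length : Int) = ((pos + t0 : Nat) : Int) by omega]
          simp only [pvAGo, reduceIte]
          rw [show ((pos + t0 : Nat) : Int) + 1 = ((pos + t0 + 1 : Nat) : Int) by omega]
        -- B side: unfold one loop iteration
        simp only [pvBGo, if_pos hpn, hltI]
        rw [if_neg (show ¬ ((pos + t0 : Nat) : Int) = -1 by omega)]
        simp only [Int.toNat_natCast]
        rw [if_neg (show ¬ pos + t0 = cs.length by omega)]
        rw [PySem.List.slice_natCast, show pos + t0 - pos = t0 by omega, htake]
        have hfrom2 : PySem.Chars.findFrom cs ['>'] ((pos + t0 : Nat) : Int) none =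
            if PySem.Chars.find (cs.drop (pos + t0)) ['>'] = -1 then -1
            else ((pos + t0 : Nat) : Int) + PySem.Chars.find (cs.drop (pos + t0)) ['>'] :=
          PySem.Chars.findFrom_natCast cs ['>'] (pos + t0) (by omega)
        by_cases hg : '>' ∈ cs.drop (pos + t0)
        case neg =>
          -- tag never closes: B jumps to n and stops; A stays in_tag to the end
          have hfindg : PySem.Chars.find (cs.drop (pos + t0)) ['>'] = -1 := by
            rw [pv_find_single, if_neg hg]
          rw [hfrom2, if_pos hfindg, if_pos rfl]
          rw [ih cs.length cs _ _ (by omega)]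
          rw [List.drop_length]
          have htlg : ∀ x ∈ tl, x ≠ '>' := by
            intro x hx h
            exact hg (by rw [hdropd]; exact List.mem_cons_of_mem _ (h ▸ hx))
          rw [hAside, show tl = tl ++ [] by simp, pv_aGo_tag tl [] _ _ _ htlg]
          simp [pvAGo]
        case pos =>
          -- tag closes at gt = pos + t0 + u; both continue at gt + 1
          have hsplitg := pv_split (cs.drop (pos + t0)) '>' hg
          set u := ((cs.drop (pos + t0)).takeWhile (· != '>')).length with hu
          have hfindg : PySem.Chars.find (cs.drop (pos + t0)) ['>'] = (u : Int) := by
            rw [pv_find_single, if_pos hg]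
          set tl2 := ((cs.drop (pos + t0)).dropWhile (· != '>')).tail with htl2
          have hTW : (cs.drop (pos + t0)).takeWhile (· != '>')
              = '<' :: tl.takeWhile (· != '>') := by
            rw [hdropd, List.takeWhile_cons]
            simp
          set seg2 := tl.takeWhile (· != '>') with hseg2
          have huu : u = seg2.length + 1 := by rw [hu, hTW]; simp
          have htlsplit : tl = seg2 ++ '>' :: tl2 := by
            have h1 : ('<' : Char) :: tl = ('<' :: seg2) ++ '>' :: tl2 := by
              rw [← hdropd]
              conv_lhs => rw [hsplitg]
              rw [hTW]
            simpa using h1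
          have hulen : pos + t0 + u < cs.length := by
            have : (cs.drop (pos + t0)).length = cs.length - (pos + t0) := by simp
            have h2 : (cs.drop (pos + t0)).length = u + 1 + tl2.length := by
              conv_lhs => rw [hsplitg]
              simp [hu]
              omega
            omega
          have htl2drop : cs.drop (pos + t0 + u + 1) = tl2 := by
            rw [show pos + t0 + u + 1 = (pos + t0) + (u + 1) by omega, ← List.drop_drop]
            conv_lhs => rw [hsplitg]
            rw [List.drop_append]
            simp [hu]
          rw [hfrom2, hfindg]
          rw [if_neg (by omega : ¬ (u : Int) = -1)]
          rw [if_neg (by omega : ¬ (((pos + t0 : Nat) : Int) + (u : Int)) = -1)]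
          rw [show (((pos + t0 : Nat) : Int) + (u : Int)).toNat = pos + t0 + u by omega]
          rw [ih (pos + t0 + u + 1) cs _ _ (by omega)]
          rw [htl2drop, hAside]
          conv_rhs => rw [htlsplit]
          rw [pv_aGo_tag seg2 ('>' :: tl2) _ _ _ (pv_takeWhile_ne tl '>')]
          simp only [pvAGo]
          rw [show ((pos + t0 + 1 : Nat) : Int) + ((seg2.length : Nat) : Int) + 1
            = ((pos + t0 + u + 1 : Nat) : Int) by omega]
          simp

-- ===== VERDICT (by name: the statement is the Claim_ definition above) =====
theorem extract_xml_text_positions_py_spec : Claim_equal_extract_xml_text_positions_py := by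
  intro raw_xml _
  show extract_xml_text_positions_py raw_xml = extract_xml_text_positions_py_alt raw_xml
  rw [extract_xml_text_positions_py, extract_xml_text_positions_py_alt,
    pv_main (raw_xml.toList.length + 1) 0 raw_xml.toList [] [] (by omega)]
  simp
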